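-- pv_equiv track=rewrite | github.com/mhsfull/requestpokeapi | filters.py | filter_gender
-- ===== SOURCE A (Python) =====
-- def filter_gender(genders):
--     female=0
--     male=0
--     genderless=0
--     for gender in genders:
--         if gender == 'female':
--             female=1
--         if gender == 'male':
--             male= 1
--         if gender == 'genderless':
--             genderless=1
--     generos=[female, male, genderless]
--     return generos
-- ===== SOURCE B (Python) =====
-- def filter_gender(genders):
--     # Loop interchange: iterate over the three target names and linearly
--     # search the list once per target, instead of one data pass with flags.
--     return [1 if target in genders else 0
--             for target in ('female', 'male', 'genderless')]
-- ===== Notes on version B (the rewrite author's own statement) =====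
-- stated objective: simpler
-- what changed: Interchanges the loops: instead of A's single pass over the data mutating three flag variables, B loops over the three target names and performs a linear search of the list for each, emitting the flags directly as a comprehension.
import Mathlib
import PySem

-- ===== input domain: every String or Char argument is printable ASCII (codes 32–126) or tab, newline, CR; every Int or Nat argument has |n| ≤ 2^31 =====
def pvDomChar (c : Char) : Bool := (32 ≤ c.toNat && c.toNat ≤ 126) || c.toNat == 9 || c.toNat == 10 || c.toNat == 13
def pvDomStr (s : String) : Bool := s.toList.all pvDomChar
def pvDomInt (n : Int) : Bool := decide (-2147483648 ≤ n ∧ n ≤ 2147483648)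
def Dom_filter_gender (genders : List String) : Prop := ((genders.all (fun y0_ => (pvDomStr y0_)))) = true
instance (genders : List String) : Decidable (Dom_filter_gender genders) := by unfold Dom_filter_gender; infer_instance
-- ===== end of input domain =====

-- B interchanges the loops: it iterates over the three target names and linearly searches the list for each (simpler decomposition).


-- ===== PORT A =====
def filter_gender (genders : List String) : List Int :=
  let st := genders.foldl (fun (st : Int × Int × Int) gender =>
    let st := if gender = "female" then (1, st.2.1, st.2.2) else st
    let st := if gender = "male" then (st.1, 1, st.2.2) else st
    let st := if gender = "genderless" then (st.1, st.2.1, 1) else st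
    st) (0, 0, 0)
  [st.1, st.2.1, st.2.2]

-- ===== PORT B =====
def filter_gender_alt (genders : List String) : List Int :=
  ["female", "male", "genderless"].map (fun target => if target ∈ genders then 1 else 0)

-- ===== PRECONDITION & SPEC =====
def Spec_filter_gender (genders : List String) (out : List Int) : Prop := out = filter_gender_alt genders
instance (genders : List String) (out : List Int) : Decidable (Spec_filter_gender genders out) := by unfold Spec_filter_gender; infer_instance

-- ===== CLAIM (what is proved, stated in full; the proofs are below) =====
def Claim_equal_filter_gender : Prop := ∀ (genders : List String), Dom_filter_gender genders → Spec_filter_gender genders (filter_gender genders)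

-- ===== LEMMAS AND PROOFS =====
-- A's fold from an arbitrary start state: each flag becomes 1 exactly when the word occurs.
theorem filter_gender_foldl_char (genders : List String) (st : Int × Int × Int) :
    genders.foldl (fun (st : Int × Int × Int) gender =>
      let st := if gender = "female" then (1, st.2.1, st.2.2) else st
      let st := if gender = "male" then (st.1, 1, st.2.2) else st
      let st := if gender = "genderless" then (st.1, st.2.1, 1) else st
      st) st =
    ((if "female" ∈ genders then 1 else st.1),
     (if "male" ∈ genders then 1 else st.2.1),
     (if "genderless" ∈ genders then 1 else st.2.2)) := by
  induction genders generalizing st with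
  | nil => simp
  | cons x xs ih =>
    simp only [List.foldl_cons, ih, List.mem_cons]
    by_cases hf : x = "female" <;> by_cases hm : x = "male" <;>
      by_cases hg : x = "genderless" <;> simp_all [eq_comm]

-- ===== VERDICT (by name: the statement is the Claim_ definition above) =====
theorem filter_gender_spec : Claim_equal_filter_gender := by
  intro genders _
  unfold Spec_filter_gender filter_gender filter_gender_alt
  simp [filter_gender_foldl_char]
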